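-- pv_equiv track=rewrite | github.com/grymmjack/DRAW | UTILS/align-qb64pe.py | find_as_pos
-- ===== SOURCE A (Python) =====
-- def find_as_pos(line: str) -> int:
--     """Return the index of the space before ' AS ' in a TYPE/DIM declaration, or -1.
--
--     Only matches when the LHS (before ' AS ') looks like a simple identifier
--     (no parentheses) so SUB/FUNCTION parameter lists are excluded.
--     Case-insensitive; stops at the first ' AS ' found outside a string.
--     """
--     stripped = line.lstrip()
--     if not stripped or stripped.startswith("'") or stripped.upper().startswith("REM "):
--         return -1
--
--     # Exclude file-I/O and other non-declaration uses of 'AS'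
--     _su = stripped.upper()
--     for _kw in ('OPEN ', 'LOCK ', 'UNLOCK ', 'GET ', 'PUT ', 'SEEK ', 'FOR '):
--         if _su.startswith(_kw):
--             return -1
--
--     in_string = False
--     i = 0
--     while i < len(line) - 3:
--         ch = line[i]
--         if ch == '"':
--             if in_string:
--                 if i + 1 < len(line) and line[i + 1] == '"':
--                     i += 2
--                     continue
--                 in_string = False
--             else:
--                 in_string = True
--         elif not in_string and line[i:i + 4].upper() == ' AS ':
--             lhs = line[:i].strip()
--             # Skip parameter-list contexts
--             if '(' not in lhs and ')' not in lhs: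
--                 # Skip 'DIM [SHARED] AS TYPE varlist' — type precedes name
--                 lhs_upper = lhs.upper()
--                 for _prefix in ('DIM SHARED', 'DIM', 'REDIM SHARED', 'REDIM'):
--                     if lhs_upper == _prefix:
--                         break  # LHS is keyword-only — no variable name present
--                 else:
--                     return i
--         i += 1
--     return -1
-- ===== SOURCE B (Python) =====
-- SENT = '\x00'
--
-- REJECT_PREFIXES = ('REM ', 'OPEN ', 'LOCK ', 'UNLOCK ', 'GET ', 'PUT ', 'SEEK ', 'FOR ')
-- KEYWORD_ONLY = ('DIM SHARED', 'DIM', 'REDIM SHARED', 'REDIM')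
--
--
-- def _mask(line):
--     """Copy line, replacing string-literal characters (quotes included, with
--     the doubled-quote escape) by a sentinel that cannot occur in ' AS '."""
--     out = []
--     in_string = False
--     i, n = 0, len(line)
--     while i < n:
--         ch = line[i]
--         if ch == '"':
--             if in_string and i + 1 < n and line[i + 1] == '"':
--                 out.append(SENT)
--                 out.append(SENT)
--                 i += 2
--                 continue
--             in_string = not in_string
--             out.append(SENT)
--             i += 1
--         else:
--             out.append(ch if not in_string else SENT)
--             i += 1
--     return ''.join(out)
--
--
-- def _rejected(line):
--     stripped = line.lstrip()
--     if not stripped or stripped[0] == "'":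
--         return True
--     su = stripped.upper()
--     return any(su.startswith(k) for k in REJECT_PREFIXES)
--
--
-- def _ok_lhs(lhs):
--     return '(' not in lhs and ')' not in lhs and lhs.upper() not in KEYWORD_ONLY
--
--
-- def find_as_pos(line: str) -> int:
--     if _rejected(line):
--         return -1
--     u = _mask(line).upper()
--     hits = [i for i in range(max(len(line) - 3, 0)) if u[i:i + 4] == ' AS ']
--     for i in hits:
--         if _ok_lhs(line[:i].strip()):
--             return i
--     return -1
-- ===== Notes on version B (the rewrite author's own statement) =====
-- stated objective: alternative
-- what changed: Replaces A's single fused stateful scan by staged passes: a mask pass blanks string literals (doubled-quote escape included) to a sentinel, a comprehension collects all ' AS ' window positions in the uppercased mask, and a final loop over that hit list applies the LHS checks on the raw line; the guards become one any() over a prefix tuple and the keyword-only test a tuple membership.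
import Mathlib
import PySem

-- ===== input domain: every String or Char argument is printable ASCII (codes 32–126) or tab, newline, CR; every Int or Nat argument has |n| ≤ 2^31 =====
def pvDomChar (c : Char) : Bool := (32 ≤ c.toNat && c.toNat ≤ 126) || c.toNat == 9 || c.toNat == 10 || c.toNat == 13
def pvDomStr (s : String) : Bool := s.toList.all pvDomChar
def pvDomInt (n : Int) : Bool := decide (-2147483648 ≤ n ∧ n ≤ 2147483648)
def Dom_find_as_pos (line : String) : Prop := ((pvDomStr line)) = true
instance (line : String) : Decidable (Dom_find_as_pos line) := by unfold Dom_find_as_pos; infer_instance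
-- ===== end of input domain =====

-- B replaces A's fused stateful scan by staged passes: mask the string literals,
-- collect all ' AS ' window positions, then test the LHS at each hit; same value, no speed claim.

-- ===== PORT A =====
-- A's inner `for _prefix in (...)`/else: true iff the LHS equals one of the keywords (break).
def pvPrefLoop (lhsU : List Char) (ps : List (List Char)) : Bool :=
  match ps with
  | [] => false
  | p :: rest => if lhsU = p then true else pvPrefLoop lhsU rest

-- A's `for _kw in (...)` over the file-I/O keywords: true iff some startswith hits (return -1).
def pvKwLoop (su : List Char) (kws : List (List Char)) : Bool :=
  match kws with
  | [] => false
  | k :: rest => if PySem.Chars.startswith su k then true else pvKwLoop su rest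

-- A's fused while-loop: string state, doubled-quote skip and ' AS ' window test in one scan.
def pvLoopA (cs : List Char) (inStr : Bool) (i : Nat) : Int :=
  if h : i < cs.length - 3 then
    if cs[i]'(by omega) = '"' then
      if inStr then
        if cs[i+1]? = some '"' then
          pvLoopA cs true (i+2)
        else
          pvLoopA cs false (i+1)
      else
        pvLoopA cs true (i+1)
    else
      if inStr = false ∧
          PySem.Chars.upper (PySem.List.slice cs (some (i:Int)) (some ((i:Int)+4))) = [' ','A','S',' '] then
        if PySem.Chars.isIn ['('] (PySem.Chars.strip (PySem.List.slice cs none (some (i:Int)))) = false ∧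
           PySem.Chars.isIn [')'] (PySem.Chars.strip (PySem.List.slice cs none (some (i:Int)))) = false then
          if pvPrefLoop (PySem.Chars.upper (PySem.Chars.strip (PySem.List.slice cs none (some (i:Int)))))
              ["DIM SHARED".toList, "DIM".toList, "REDIM SHARED".toList, "REDIM".toList] then
            pvLoopA cs inStr (i+1)
          else
            (i : Int)
        else
          pvLoopA cs inStr (i+1)
      else
        pvLoopA cs inStr (i+1)
  else
    -1
termination_by cs.length - i

def find_as_pos (line : String) : Int :=
  let stripped := PySem.Chars.lstrip line.toList
  if stripped = [] ∨ PySem.Chars.startswith stripped ['\''] = true ∨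
      PySem.Chars.startswith (PySem.Chars.upper stripped) "REM ".toList = true then
    -1
  else if pvKwLoop (PySem.Chars.upper stripped)
      ["OPEN ".toList, "LOCK ".toList, "UNLOCK ".toList, "GET ".toList,
       "PUT ".toList, "SEEK ".toList, "FOR ".toList] = true then
    -1
  else
    pvLoopA line.toList false 0

-- ===== PORT B =====
def pvSent : Char := Char.ofNat 0

-- B's mask pass: copy the line, blanking string-literal characters (with the
-- doubled-quote escape) to a sentinel; ported as recursion on the remaining suffix.
def pvMask (inStr : Bool) (l : List Char) : List Char :=
  match l with
  | [] => []
  | c :: rest =>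
    if c = '"' then
      if inStr && (rest.head? == some '"') then
        pvSent :: pvSent :: pvMask true rest.tail
      else
        pvSent :: pvMask (!inStr) rest
    else
      (if inStr then pvSent else c) :: pvMask inStr rest
termination_by l.length
decreasing_by
  all_goals simp [List.length_tail]

-- B's _rejected: empty / comment head / any() over the eight reject prefixes.
def pvRejected (cs : List Char) : Bool :=
  let stripped := PySem.Chars.lstrip cs
  decide (stripped = []) || (stripped.head? == some '\'') ||
    (["REM ", "OPEN ", "LOCK ", "UNLOCK ", "GET ", "PUT ", "SEEK ", "FOR "].any
      (fun k => PySem.Chars.startswith (PySem.Chars.upper stripped) k.toList))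

-- B's _ok_lhs: paren-free and not keyword-only (tuple membership).
def pvOkLhs (lhs : List Char) : Bool :=
  !(PySem.Chars.isIn ['('] lhs) && !(PySem.Chars.isIn [')'] lhs) &&
  !(["DIM SHARED".toList, "DIM".toList, "REDIM SHARED".toList, "REDIM".toList].contains
      (PySem.Chars.upper lhs))

-- B's hit-list comprehension predicate: ' AS ' window in the uppercased mask.
def pvHitP (cs : List Char) (j : Nat) : Bool :=
  PySem.List.slice (PySem.Chars.upper (pvMask false cs)) (some (j:Int)) (some ((j:Int)+4))
    == [' ','A','S',' ']

-- B's final `for i in hits` loop.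
def pvFindHit (cs : List Char) (hits : List Nat) : Int :=
  match hits with
  | [] => -1
  | i :: rest =>
    if pvOkLhs (PySem.Chars.strip (PySem.List.slice cs none (some (i:Int)))) then (i : Int)
    else pvFindHit cs rest

def find_as_pos_alt (line : String) : Int :=
  if pvRejected line.toList then -1
  else
    pvFindHit line.toList
      ((List.range (line.toList.length - 3)).filter (pvHitP line.toList))

-- ===== PRECONDITION & SPEC =====
def Spec_find_as_pos (line : String) (out : Int) : Prop := out = find_as_pos_alt line
instance (line : String) (out : Int) : Decidable (Spec_find_as_pos line out) := by unfold Spec_find_as_pos; infer_instance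

-- ===== CLAIM (what is proved, stated in full; the proofs are below) =====
def Claim_equal_find_as_pos : Prop := ∀ (line : String), Dom_find_as_pos line → Spec_find_as_pos line (find_as_pos line)

-- ===== LEMMAS AND PROOFS =====

lemma pvUpper_sent : PySem.Chars.upperChar pvSent = pvSent := by decide

lemma pvUpper_quote : PySem.Chars.upperChar '"' = '"' := by decide

-- the window lemma: masked and raw windows match a quote/sentinel-free pattern together
lemma pvWin : ∀ (p t : List Char), pvSent ∉ p → '"' ∉ p →
    (List.take p.length (List.map PySem.Chars.upperChar (pvMask false t)) = p ↔
     List.take p.length (List.map PySem.Chars.upperChar t) = p) := by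
  intro p
  induction p with
  | nil => intro t _ _; simp
  | cons p0 p' ih =>
    intro t hs hq
    cases t with
    | nil => simp [pvMask]
    | cons c t' =>
      by_cases hc : c = '"'
      · subst hc
        rw [pvMask]
        simp only [Bool.false_and, Bool.false_eq_true]
        have h1 : PySem.Chars.upperChar pvSent ≠ p0 := by
          rw [pvUpper_sent]; intro h; exact hs (h ▸ List.mem_cons_self)
        have h2 : PySem.Chars.upperChar '"' ≠ p0 := by
          rw [pvUpper_quote]; intro h; exact hq (h ▸ List.mem_cons_self)
        simp [List.take_succ_cons, h1, h2]
      · rw [pvMask]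
        simp only [if_neg hc, List.map_cons, List.length_cons, List.take_succ_cons,
          List.cons.injEq]
        constructor
        · rintro ⟨h0, h1⟩
          exact ⟨h0, (ih t' (fun m => hs (List.mem_cons_of_mem _ m))
            (fun m => hq (List.mem_cons_of_mem _ m))).mp h1⟩
        · rintro ⟨h0, h1⟩
          exact ⟨h0, (ih t' (fun m => hs (List.mem_cons_of_mem _ m))
            (fun m => hq (List.mem_cons_of_mem _ m))).mpr h1⟩

lemma pvSlice4 (u : List Char) (i : Nat) :
    PySem.List.slice u (some (i:Int)) (some ((i:Int)+4)) = List.take 4 (List.drop i u) := by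
  have h : ((i:Int)+4) = ((i+4 : Nat) : Int) := by push_cast; ring
  rw [h, PySem.List.slice_natCast]
  congr 1
  omega

-- a sentinel-headed window can never match ' AS '
lemma pvSentHead (rest : List Char) :
    List.take 4 (List.map PySem.Chars.upperChar (pvSent :: rest)) ≠ [' ','A','S',' '] := by
  intro h
  have h0 := congrArg List.head? h
  simp [pvUpper_sent] at h0
  exact absurd h0 (by decide)

-- pvHitP unfolded to a take/drop window over the uppercased mask
lemma pvHitP_iff (cs : List Char) (i : Nat) :
    pvHitP cs i = true ↔
      List.take 4 (List.map PySem.Chars.upperChar (List.drop i (pvMask false cs)))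
        = [' ','A','S',' '] := by
  rw [pvHitP, beq_iff_eq, pvSlice4, PySem.Chars.upper, List.map_drop]

-- one B hit-list step disappears when the window at i cannot match
lemma pvHits_step (cs : List Char) (i m : Nat)
    (h : pvHitP cs i = false) :
    (List.range' i (m+1)).filter (pvHitP cs) = (List.range' (i+1) m).filter (pvHitP cs) := by
  rw [List.range'_succ, List.filter_cons, if_neg (by simp [h])]

-- the membership loop of A equals B's tuple-contains
lemma pvPrefLoop_eq_contains (l : List Char) : ∀ (ps : List (List Char)),
    pvPrefLoop l ps = ps.contains l := by
  intro ps
  induction ps with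
  | nil => rfl
  | cons p rest ih =>
    rw [pvPrefLoop, List.contains_cons, ih]
    by_cases h : l = p <;> simp [h]

-- A's keyword for-loop equals B's any()
lemma pvKwLoop_eq_any (su : List Char) : ∀ (kws : List (List Char)),
    pvKwLoop su kws = kws.any (fun k => PySem.Chars.startswith su k) := by
  intro kws
  induction kws with
  | nil => rfl
  | cons k rest ih =>
    rw [pvKwLoop, List.any_cons, ih]
    by_cases h : PySem.Chars.startswith su k = true <;> simp [h]

-- B's _ok_lhs in terms of A's three inline checks
lemma pvOkLhs_iff (lhs : List Char) :
    pvOkLhs lhs = true ↔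
      (PySem.Chars.isIn ['('] lhs = false ∧ PySem.Chars.isIn [')'] lhs = false ∧
       pvPrefLoop (PySem.Chars.upper lhs)
         ["DIM SHARED".toList, "DIM".toList, "REDIM SHARED".toList, "REDIM".toList] = false) := by
  rw [pvOkLhs, pvPrefLoop_eq_contains]
  simp only [Bool.and_eq_true, Bool.not_eq_true', List.contains_eq_mem, List.mem_cons,
    List.not_mem_nil, or_false, decide_eq_false_iff_not, not_or]
  tauto

-- startswith by a single quote is a head test
lemma pvStartsQuote (s : List Char) :
    PySem.Chars.startswith s ['\''] = (s.head? == some '\'') := by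
  cases s with
  | nil =>
    have h : PySem.Chars.startswith ([] : List Char) ['\''] = false := by
      rw [Bool.eq_false_iff, Ne, PySem.Chars.startswith_iff]; simp
    simp [h]
  | cons c t =>
    by_cases h : c = '\''
    · subst h
      have h' : PySem.Chars.startswith ('\'' :: t) ['\''] = true := by
        rw [PySem.Chars.startswith_iff, List.cons_prefix_cons]; simp
      simp [h']
    · have hne : ('\'' : Char) ≠ c := fun e => h e.symm
      have h' : PySem.Chars.startswith (c :: t) ['\''] = false := by
        rw [Bool.eq_false_iff, Ne, PySem.Chars.startswith_iff, List.cons_prefix_cons]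
        simp [hne]
      simp [h', h]

-- the main induction: aligned states of A's fused loop and B's mask + hit list agree
set_option maxHeartbeats 1000000 in
lemma pvMain (cs : List Char) : ∀ (k i : Nat) (inStr : Bool), cs.length - i ≤ k →
    (pvMask false cs).drop i = pvMask inStr (cs.drop i) →
    pvLoopA cs inStr i =
      pvFindHit cs ((List.range' i (cs.length - 3 - i)).filter (pvHitP cs)) := by
  intro k
  induction k with
  | zero =>
    intro i inStr hk _
    rw [pvLoopA, dif_neg (by omega : ¬ i < cs.length - 3)]
    have : cs.length - 3 - i = 0 := by omega
    rw [this]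
    rfl
  | succ k ih =>
    intro i inStr hk halign
    by_cases hlt : i < cs.length - 3
    case neg =>
      rw [pvLoopA, dif_neg hlt]
      have : cs.length - 3 - i = 0 := by omega
      rw [this]
      rfl
    case pos =>
    have hi : i < cs.length := by omega
    have hm : cs.length - 3 - i = (cs.length - 3 - (i+1)) + 1 := by omega
    have hcons : cs.drop i = cs[i] :: cs.drop (i+1) := (List.getElem_cons_drop hi).symm
    have halign' := halign
    rw [hcons, pvMask] at halign'
    rw [pvLoopA, dif_pos hlt, hm]
    by_cases hc : cs[i] = '"'
    · -- quote at i: A handles string state, B's mask put a sentinel here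
      rw [if_pos hc] at *
      rw [List.head?_drop] at halign'
      by_cases hstr : inStr = true
      · rw [if_pos hstr]
        by_cases hesc : cs[i+1]? = some '"'
        · -- escaped doubled quote: A skips two, B's hits skip two sentinels
          rw [if_pos hesc]
          have h1 : (pvMask false cs).drop i =
              pvSent :: pvSent :: pvMask true (cs.drop (i+2)) := by
            rw [halign']; simp [hstr, hesc, List.tail_drop]
          have h2 : (pvMask false cs).drop (i+1) = pvSent :: pvMask true (cs.drop (i+2)) := by
            rw [← List.tail_drop, h1]; rfl
          have h3 : (pvMask false cs).drop (i+2) = pvMask true (cs.drop (i+2)) := by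
            rw [← List.tail_drop, h2]; rfl
          have hp1 : pvHitP cs i = false := by
            rw [Bool.eq_false_iff, Ne, pvHitP_iff, h1]; exact pvSentHead _
          rw [pvHits_step cs i _ hp1]
          by_cases hlt2 : i + 1 < cs.length - 3
          · have hm2 : cs.length - 3 - (i+1) = (cs.length - 3 - (i+2)) + 1 := by omega
            have hp2 : pvHitP cs (i+1) = false := by
              rw [Bool.eq_false_iff, Ne, pvHitP_iff, h2]; exact pvSentHead _
            rw [hm2, pvHits_step cs (i+1) _ hp2]
            exact ih (i+2) true (by omega) h3
          · have hz1 : cs.length - 3 - (i+1) = 0 := by omega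
            rw [hz1, pvLoopA, dif_neg (by omega : ¬ i + 2 < cs.length - 3)]
            rfl
        · -- closing quote: state goes false, B's hits skip the sentinel
          rw [if_neg hesc]
          have h1 : (pvMask false cs).drop i = pvSent :: pvMask false (cs.drop (i+1)) := by
            rw [halign']; simp [hstr, hesc]
          have h2 : (pvMask false cs).drop (i+1) = pvMask false (cs.drop (i+1)) := by
            rw [← List.tail_drop, h1]; rfl
          have hp1 : pvHitP cs i = false := by
            rw [Bool.eq_false_iff, Ne, pvHitP_iff, h1]; exact pvSentHead _
          rw [pvHits_step cs i _ hp1]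
          exact ih (i+1) false (by omega) h2
      · -- opening quote
        rw [if_neg hstr]
        have hstr' : inStr = false := by simpa using hstr
        have h1 : (pvMask false cs).drop i = pvSent :: pvMask true (cs.drop (i+1)) := by
          rw [halign']; simp [hstr']
        have h2 : (pvMask false cs).drop (i+1) = pvMask true (cs.drop (i+1)) := by
          rw [← List.tail_drop, h1]; rfl
        have hp1 : pvHitP cs i = false := by
          rw [Bool.eq_false_iff, Ne, pvHitP_iff, h1]; exact pvSentHead _
        rw [pvHits_step cs i _ hp1]
        exact ih (i+1) true (by omega) h2
    · -- ordinary character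
      rw [if_neg hc] at *
      by_cases hstr : inStr = true
      · -- inside a string: no test in A, a sentinel in B's mask
        have h1 : (pvMask false cs).drop i = pvSent :: pvMask true (cs.drop (i+1)) := by
          rw [halign']; simp [hstr]
        rw [if_neg (by simp [hstr])]
        have h2 : (pvMask false cs).drop (i+1) = pvMask true (cs.drop (i+1)) := by
          rw [← List.tail_drop, h1]; rfl
        have hp1 : pvHitP cs i = false := by
          rw [Bool.eq_false_iff, Ne, pvHitP_iff, h1]; exact pvSentHead _
        rw [pvHits_step cs i _ hp1, hstr]
        exact ih (i+1) true (by omega) h2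
      · -- outside a string: both test the same window
        have hstr' : inStr = false := by simpa using hstr
        subst hstr'
        have h1 : (pvMask false cs).drop i = cs[i] :: pvMask false (cs.drop (i+1)) := by
          rw [halign']; simp
        have h2 : (pvMask false cs).drop (i+1) = pvMask false (cs.drop (i+1)) := by
          rw [← List.tail_drop, h1]; rfl
        have hwin : pvHitP cs i = true ↔
            (PySem.Chars.upper (PySem.List.slice cs (some (i:Int)) (some ((i:Int)+4)))
              = [' ','A','S',' ']) := by
          rw [pvHitP_iff, halign, pvSlice4, PySem.Chars.upper, List.map_take]
          exact pvWin [' ','A','S',' '] (cs.drop i) (by decide) (by decide)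
        by_cases hT : PySem.Chars.upper (PySem.List.slice cs (some (i:Int)) (some ((i:Int)+4)))
            = [' ','A','S',' ']
        · rw [if_pos ⟨rfl, hT⟩]
          have hp1 : pvHitP cs i = true := hwin.mpr hT
          have hRHS : pvFindHit cs
                ((List.range' i ((cs.length - 3 - (i+1)) + 1)).filter (pvHitP cs)) =
              if pvOkLhs (PySem.Chars.strip (PySem.List.slice cs none (some (i:Int)))) = true
              then (i : Int)
              else pvFindHit cs ((List.range' (i+1) (cs.length - 3 - (i+1))).filter (pvHitP cs)) := by
            rw [List.range'_succ, List.filter_cons, if_pos (by simp [hp1])]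
            simp [pvFindHit]
          rw [hRHS]
          by_cases hok : pvOkLhs (PySem.Chars.strip (PySem.List.slice cs none (some (i:Int)))) = true
          · obtain ⟨hq1, hq2, hq3⟩ := (pvOkLhs_iff _).mp hok
            have hq3' : ¬ (pvPrefLoop
                (PySem.Chars.upper (PySem.Chars.strip (PySem.List.slice cs none (some (i:Int)))))
                ["DIM SHARED".toList, "DIM".toList, "REDIM SHARED".toList, "REDIM".toList] = true) := by
              simp only [Bool.not_eq_true]
              exact hq3
            rw [if_pos hok, if_pos ⟨hq1, hq2⟩, if_neg hq3']
          · rw [if_neg hok]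
            rw [pvOkLhs_iff] at hok
            push Not at hok
            by_cases hq : PySem.Chars.isIn ['('] (PySem.Chars.strip (PySem.List.slice cs none (some (i:Int)))) = false ∧
                PySem.Chars.isIn [')'] (PySem.Chars.strip (PySem.List.slice cs none (some (i:Int)))) = false
            · have h3 : pvPrefLoop
                  (PySem.Chars.upper (PySem.Chars.strip (PySem.List.slice cs none (some (i:Int)))))
                  ["DIM SHARED".toList, "DIM".toList, "REDIM SHARED".toList, "REDIM".toList] = true := by
                simpa using hok hq.1 hq.2
              rw [if_pos hq, if_pos h3]
              exact ih (i+1) false (by omega) h2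
            · rw [if_neg hq]
              exact ih (i+1) false (by omega) h2
        · rw [if_neg (by tauto)]
          have hp1 : pvHitP cs i = false := by
            rw [Bool.eq_false_iff, Ne, hwin]; exact hT
          rw [pvHits_step cs i _ hp1]
          exact ih (i+1) false (by omega) h2

-- ===== VERDICT (by name: the statement is the Claim_ definition above) =====
theorem find_as_pos_spec : Claim_equal_find_as_pos := by
  intro line _
  have h := pvMain line.toList line.toList.length 0 false (by omega) (by simp)
  simp only [Nat.sub_zero] at h
  unfold Spec_find_as_pos find_as_pos find_as_pos_alt pvRejected
  rw [List.range_eq_range']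
  simp only [pvStartsQuote, pvKwLoop_eq_any]
  split_ifs <;> simp_all
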